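-- pv_equiv track=rewrite | github.com/ChiragNSundar/VibeLyrics | app/analysis/syllable_counter.py | _looks_indian
-- ===== SOURCE A (Python) =====
-- def _looks_indian(word: str) -> bool:
--     """Heuristic to detect if word might be romanized Hindi/Kannada"""
--     # Common Indian language patterns
--     indian_patterns = [
--         'aa', 'ee', 'ii', 'oo', 'uu',  # Long vowels
--         'bh', 'ch', 'dh', 'gh', 'jh', 'kh', 'ph', 'th',  # Aspirated consonants
--         'sh', 'chh',  # Common sounds
--     ]
--     word_lower = word.lower()
--
--     # If word contains multiple Indian patterns, likely Indian
--     pattern_count = sum(1 for p in indian_patterns if p in word_lower)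
--     return pattern_count >= 1
-- ===== SOURCE B (Python) =====
-- _BIGRAMS = frozenset([
--     ('a', 'a'), ('e', 'e'), ('i', 'i'), ('o', 'o'), ('u', 'u'),
--     ('b', 'h'), ('c', 'h'), ('d', 'h'), ('g', 'h'), ('j', 'h'),
--     ('k', 'h'), ('p', 'h'), ('t', 'h'), ('s', 'h'),
-- ])
--
--
-- def _looks_indian(word: str) -> bool:
--     w = word.lower()
--     return any(ab in _BIGRAMS for ab in zip(w, w[1:]))
-- ===== Notes on version B (the rewrite author's own statement) =====
-- stated objective: idiomatic
-- what changed: Replaces the 15 independent substring searches (and the count) with a single left-to-right pass over the word's adjacent character pairs, testing each pair against a frozenset of the 14 two-letter patterns ('chh' is redundant since it contains 'ch') and short-circuiting on the first hit.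
import Mathlib
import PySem

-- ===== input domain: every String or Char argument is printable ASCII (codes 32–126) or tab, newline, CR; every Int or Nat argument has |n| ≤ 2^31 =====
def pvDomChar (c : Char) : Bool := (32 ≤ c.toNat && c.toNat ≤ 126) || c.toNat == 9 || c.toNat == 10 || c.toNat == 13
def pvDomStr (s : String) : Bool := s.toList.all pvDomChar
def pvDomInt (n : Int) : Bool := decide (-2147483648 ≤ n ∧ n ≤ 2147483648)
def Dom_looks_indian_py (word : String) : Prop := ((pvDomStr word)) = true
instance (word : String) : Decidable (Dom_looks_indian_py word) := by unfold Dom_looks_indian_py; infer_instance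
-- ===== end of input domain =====

-- B replaces A's 15 independent substring searches plus a count by one pass over
-- adjacent character pairs against a set of the 14 two-letter patterns
-- ('chh' is redundant since it contains 'ch'); objective: idiomatic.

-- ===== PORT A =====
def pvPatterns : List String :=
  ["aa", "ee", "ii", "oo", "uu",
   "bh", "ch", "dh", "gh", "jh", "kh", "ph", "th",
   "sh", "chh"]

def looks_indian_py (word : String) : Bool :=
  let word_lower := PySem.Str.lower word
  let pattern_count : Int :=
    pvPatterns.foldl (fun acc p => if PySem.Str.isIn p word_lower then acc + 1 else acc) 0
  decide (pattern_count ≥ 1)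

-- ===== PORT B =====
def pvBigrams : PySem.Set (Char × Char) :=
  PySem.Set.ofList
    [('a','a'), ('e','e'), ('i','i'), ('o','o'), ('u','u'),
     ('b','h'), ('c','h'), ('d','h'), ('g','h'), ('j','h'),
     ('k','h'), ('p','h'), ('t','h'), ('s','h')]

def looks_indian_py_alt (word : String) : Bool :=
  let w := (PySem.Str.lower word).toList
  (w.zip w.tail).any (fun ab => PySem.Set.contains pvBigrams ab)

-- ===== PRECONDITION & SPEC =====
def Spec_looks_indian_py (word : String) (out : Bool) : Prop := out = looks_indian_py_alt word
instance (word : String) (out : Bool) : Decidable (Spec_looks_indian_py word out) := by unfold Spec_looks_indian_py; infer_instance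

-- ===== CLAIM (what is proved, stated in full; the proofs are below) =====
def Claim_equal_looks_indian_py : Prop := ∀ (word : String), Dom_looks_indian_py word → Spec_looks_indian_py word (looks_indian_py word)

-- ===== LEMMAS AND PROOFS =====

-- A pass over adjacent pairs of l finds a hit iff some two-letter infix satisfies P.
lemma zip_tail_any_iff (P : Char × Char → Bool) :
    ∀ l : List Char, ((l.zip l.tail).any P = true) ↔ ∃ a b, [a, b] <:+: l ∧ P (a, b) = true := by
  intro l
  induction l with
  | nil => simp
  | cons a t ih =>
    cases t with
    | nil =>
      simp only [List.tail_cons, List.zip_nil_right, List.any_nil]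
      constructor
      · intro h; cases h
      · rintro ⟨x, y, hinf, -⟩
        have := hinf.length_le
        simp at this
    | cons b t' =>
      constructor
      · intro h
        simp only [List.tail_cons, List.zip_cons_cons, List.any_cons, Bool.or_eq_true] at h
        rcases h with h | h
        · exact ⟨a, b, ⟨[], t', rfl⟩, h⟩
        · have h' : ((b :: t').zip (b :: t').tail).any P = true := by
            simpa using h
          rcases ih.mp h' with ⟨x, y, hinf, hP⟩
          exact ⟨x, y, hinf.trans (List.suffix_cons a (b :: t')).isInfix, hP⟩
      · rintro ⟨x, y, hinf, hP⟩
        simp only [List.tail_cons, List.zip_cons_cons, List.any_cons, Bool.or_eq_true]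
        rcases List.infix_cons_iff.mp hinf with hpre | hinf'
        · rcases hpre with ⟨s, hs⟩
          simp only [List.cons_append, List.cons.injEq] at hs
          obtain ⟨rfl, rfl, -⟩ := hs
          exact Or.inl hP
        · right
          have := ih.mpr ⟨x, y, hinf', hP⟩
          simpa using this

lemma bigrams_eq : (pvBigrams : List (Char × Char)) =
    [('a','a'), ('e','e'), ('i','i'), ('o','o'), ('u','u'),
     ('b','h'), ('c','h'), ('d','h'), ('g','h'), ('j','h'),
     ('k','h'), ('p','h'), ('t','h'), ('s','h')] := by decide

theorem looks_indian_py_spec : Claim_equal_looks_indian_py := by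
  intro word _
  unfold Spec_looks_indian_py looks_indian_py looks_indian_py_alt
  set L := (PySem.Str.lower word).toList with hL
  -- A = true ↔ some pattern is an infix of the lowered word
  have hA : (decide ((1:Int) ≤ pvPatterns.foldl
      (fun acc p => if PySem.Str.isIn p (PySem.Str.lower word) then acc + 1 else acc) 0) = true)
      ↔ ∃ p ∈ pvPatterns, p.toList <:+: L := by
    rw [PySem.List.foldl_if_add_one]
    rw [decide_eq_true_iff]
    have : ((1:Int) ≤ 0 + (pvPatterns.countP
        (fun p => PySem.Str.isIn p (PySem.Str.lower word)) : Int))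
        ↔ 0 < pvPatterns.countP (fun p => PySem.Str.isIn p (PySem.Str.lower word)) := by
      omega
    rw [this, List.countP_pos_iff]
    constructor
    · rintro ⟨p, hp, h⟩
      exact ⟨p, hp, (PySem.Str.isIn_iff_infix _ _).mp h⟩
    · rintro ⟨p, hp, h⟩
      exact ⟨p, hp, (PySem.Str.isIn_iff_infix _ _).mpr h⟩
  -- B = true ↔ some bigram from the set is an infix of the lowered word
  have hB : ((L.zip L.tail).any (fun ab => PySem.Set.contains pvBigrams ab) = true)
      ↔ ∃ a b, [a, b] <:+: L ∧ PySem.Set.contains pvBigrams (a, b) = true :=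
    zip_tail_any_iff _ L
  -- the two existentials are equivalent
  have hbridge : (∃ p ∈ pvPatterns, p.toList <:+: L)
      ↔ ∃ a b, [a, b] <:+: L ∧ PySem.Set.contains pvBigrams (a, b) = true := by
    constructor
    · rintro ⟨p, hp, hinf⟩
      simp only [pvPatterns, List.mem_cons, List.not_mem_nil, or_false] at hp
      rcases hp with rfl|rfl|rfl|rfl|rfl|rfl|rfl|rfl|rfl|rfl|rfl|rfl|rfl|rfl|rfl
      all_goals first
      | · -- "chh": its prefix "ch" is also an infix
          refine ⟨'c', 'h', ?_, by decide⟩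
          exact List.IsInfix.trans (l₂ := "chh".toList) ⟨[], ['h'], rfl⟩ hinf
      | · exact ⟨_, _, hinf, by decide⟩
    · rintro ⟨a, b, hinf, hmem⟩
      rw [PySem.Set.contains_iff, bigrams_eq] at hmem
      simp only [List.mem_cons, List.not_mem_nil, or_false, Prod.mk.injEq] at hmem
      rcases hmem with ⟨rfl, rfl⟩|⟨rfl, rfl⟩|⟨rfl, rfl⟩|⟨rfl, rfl⟩|⟨rfl, rfl⟩|⟨rfl, rfl⟩|
        ⟨rfl, rfl⟩|⟨rfl, rfl⟩|⟨rfl, rfl⟩|⟨rfl, rfl⟩|⟨rfl, rfl⟩|⟨rfl, rfl⟩|⟨rfl, rfl⟩|⟨rfl, rfl⟩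
      exacts [⟨"aa", by decide, hinf⟩, ⟨"ee", by decide, hinf⟩, ⟨"ii", by decide, hinf⟩,
        ⟨"oo", by decide, hinf⟩, ⟨"uu", by decide, hinf⟩, ⟨"bh", by decide, hinf⟩,
        ⟨"ch", by decide, hinf⟩, ⟨"dh", by decide, hinf⟩, ⟨"gh", by decide, hinf⟩,
        ⟨"jh", by decide, hinf⟩, ⟨"kh", by decide, hinf⟩, ⟨"ph", by decide, hinf⟩,
        ⟨"th", by decide, hinf⟩, ⟨"sh", by decide, hinf⟩]
  simp only [ge_iff_le]
  rw [Bool.eq_iff_iff, hA, hB]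
  exact hbridge
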